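-- pv_equiv track=rewrite | github.com/danilo-patrucco/pythonHW_classnotes | HW07_DaniloPatrucco.py | shareALetter
-- ===== SOURCE A (Python) =====
-- def shareALetter(wordList):
--     dict = {}
--     for words in wordList:
--         if words not in dict:
--             dict[words] = [words]
--         for word in dict.keys():
--             if word != words:
--                 for letters in word:
--                     if letters in words and word not in dict[words]:
--                         dict[words].append(word)
--
--     return dict
-- ===== SOURCE B (Python) =====
-- def shareALetter(wordList):
--     first = {}
--     last = {}
--     order = []
--     for i, w in enumerate(wordList):
--         if w not in first:
--             first[w] = i
--             order.append(w)
--         last[w] = i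
--     mask = {}
--     for w in order:
--         m = 0
--         for c in w:
--             m |= 1 << ord(c)
--         mask[w] = m
--     result = {}
--     for w in order:
--         mw = mask[w]
--         lw = last[w]
--         result[w] = [w] + [u for u in order
--                            if u != w and first[u] < lw and (mask[u] & mw) != 0]
--     return result
-- ===== Notes on version B (the rewrite author's own statement) =====
-- stated objective: faster
-- what changed: A rescans every dict key and every letter of it on each occurrence of each word; B makes one indexing pass recording first/last-occurrence indices and insertion order, precomputes a letter bitmask per distinct word, and builds each entry by a single scan over the distinct words comparing indices and intersecting bitmasks.
import Mathlib
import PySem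

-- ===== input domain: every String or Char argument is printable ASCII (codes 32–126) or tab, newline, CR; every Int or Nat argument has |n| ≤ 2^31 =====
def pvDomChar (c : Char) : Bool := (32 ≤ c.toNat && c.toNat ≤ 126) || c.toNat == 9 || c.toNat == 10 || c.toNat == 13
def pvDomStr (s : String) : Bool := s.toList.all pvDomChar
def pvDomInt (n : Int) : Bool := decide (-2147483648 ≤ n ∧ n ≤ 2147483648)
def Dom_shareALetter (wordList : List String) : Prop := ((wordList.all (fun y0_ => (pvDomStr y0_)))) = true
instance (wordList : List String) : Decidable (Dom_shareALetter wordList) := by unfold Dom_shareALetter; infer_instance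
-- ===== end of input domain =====

-- B replaces A's per-word rescan of all dict keys and their letters with one indexing
-- pass (first/last-occurrence index, insertion order) plus per-word letter bitmasks
-- (objective: faster); A mutates nothing, so the equivalence is about the return value.

-- ===== PORT A =====
-- loop body of 'for letters in word' (mutating dict[words] in place)
def pvCharStep (words word : String) (d : PySem.Dict String (List String)) (letters : Char) :
    PySem.Dict String (List String) :=
  if words.toList.contains letters && !((d.getD words []).contains word) then
    d.insert words ((d.getD words []) ++ [word])
  else d

-- loop body of 'for word in dict.keys()'
def pvKeyStep (words : String) (d : PySem.Dict String (List String)) (word : String) :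
    PySem.Dict String (List String) :=
  if word != words then word.toList.foldl (pvCharStep words word) d else d

-- loop body of 'for words in wordList'
def pvWordStep (d : PySem.Dict String (List String)) (words : String) :
    PySem.Dict String (List String) :=
  let d := if !(d.contains words) then d.insert words [words] else d
  d.keys.foldl (pvKeyStep words) d

def shareALetter (wordList : List String) : List (String × List String) :=
  (wordList.foldl pvWordStep PySem.Dict.empty).items

-- ===== PORT B =====
-- one indexing pass over enumerate(wordList): first-occurrence index, last-occurrence
-- index, and the distinct words in insertion order
def pvAltIndexStep (st : PySem.Dict String Int × PySem.Dict String Int × List String)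
    (p : Int × String) : PySem.Dict String Int × PySem.Dict String Int × List String :=
  let first := st.1
  let last := st.2.1
  let order := st.2.2
  let fo := if !(first.contains p.2) then (first.insert p.2 p.1, order ++ [p.2]) else (first, order)
  (fo.1, last.insert p.2 p.1, fo.2)

-- letter bitmask of a word: bit ord(c) set for each character c (Python's m |= 1 << ord(c)
-- on nonnegative ints is exactly Nat ||| / <<< here)
def pvAltMask (w : String) : Nat :=
  w.toList.foldl (fun m c => m ||| (1 <<< c.toNat)) 0

def shareALetter_alt (wordList : List String) : List (String × List String) :=
  let st := (PySem.List.enumerate wordList).foldl pvAltIndexStep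
    (PySem.Dict.empty, PySem.Dict.empty, [])
  let first := st.1
  let last := st.2.1
  let order := st.2.2
  let mask := order.foldl (fun m w => m.insert w (pvAltMask w))
    (PySem.Dict.empty : PySem.Dict String Nat)
  let result := order.foldl (fun r w =>
      r.insert w (w :: order.filter (fun u =>
        (u != w) && decide (first.getD u 0 < last.getD w 0)
          && ((mask.getD u 0 &&& mask.getD w 0) != 0))))
    (PySem.Dict.empty : PySem.Dict String (List String))
  result.items

-- ===== PRECONDITION & SPEC =====
def Spec_shareALetter (wordList : List String) (out : List (String × List String)) : Prop := out = shareALetter_alt wordList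
instance (wordList : List String) (out : List (String × List String)) : Decidable (Spec_shareALetter wordList out) := by unfold Spec_shareALetter; infer_instance

-- ===== CLAIM (what is proved, stated in full; the proofs are below) =====
def Claim_equal_shareALetter : Prop := ∀ (wordList : List String), Dom_shareALetter wordList → Spec_shareALetter wordList (shareALetter wordList)

-- ===== LEMMAS AND PROOFS =====

-- 'some letter of u occurs in w'
def pvShares (u w : String) : Bool := u.toList.any (fun c => w.toList.contains c)

-- the value both programs associate with a distinct word w of p: w itself, then every
-- other distinct word u sharing a letter whose first occurrence precedes w's last one
def pvVal (p : List String) (w : String) : List String :=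
  w :: (PySem.List.dedup p).filter (fun u =>
    (u != w) && pvShares u w && decide (w ∈ p.drop (p.idxOf u + 1)))

def pvValIf (p : List String) (w : String) : List String :=
  if w ∈ p then pvVal p w else []

-- index of the last occurrence of w in p
def pvLastIdx (p : List String) (w : String) : Nat :=
  p.length - 1 - p.reverse.idxOf w

-- invariant of A's main loop after processing prefix p
def pvInvA (p : List String) (d : PySem.Dict String (List String)) : Prop :=
  d.keys = PySem.List.dedup p ∧ ∀ w, d.getD w [] = pvValIf p w

-- invariant of B's indexing pass after processing prefix p
def pvInvB (p : List String)
    (st : PySem.Dict String Int × PySem.Dict String Int × List String) : Prop :=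
  st.2.2 = PySem.List.dedup p ∧
  (∀ u, st.1.get? u = if u ∈ p then some ((p.idxOf u : Int)) else none) ∧
  (∀ w, st.2.1.get? w = if w ∈ p then some ((pvLastIdx p w : Int)) else none)

lemma pv_dedup_append (p : List String) (x : String) :
    PySem.List.dedup (p ++ [x]) =
      if x ∈ p then PySem.List.dedup p else PySem.List.dedup p ++ [x] := by
  have h1 : PySem.List.dedup (p ++ [x]) = PySem.Set.add (PySem.Set.ofList p) x := by
    simp [PySem.List.dedup, PySem.Set.ofList, List.foldl_append]
  rw [h1, PySem.Set.add]
  by_cases h : x ∈ p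
  · rw [if_pos ((PySem.Set.contains_iff _ _).mpr ((PySem.Set.mem_ofList p x).mpr h)), if_pos h]
    rfl
  · rw [if_neg, if_neg h]
    · rfl
    · simp only [PySem.Set.contains_iff, PySem.Set.mem_ofList]
      simpa using h

lemma pv_dedup_pairwise_idxOf (p : List String) :
    (PySem.List.dedup p).Pairwise (fun a b => p.idxOf a < p.idxOf b) := by
  induction p using List.reverseRecOn with
  | nil => simp [PySem.List.dedup, PySem.Set.ofList]
  | append_singleton p x ih =>
    rw [pv_dedup_append]
    by_cases h : x ∈ p
    · rw [if_pos h]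
      refine ih.imp_of_mem ?_
      intro a b ha hb hab
      have ha' := (PySem.List.mem_dedup p a).mp ha
      have hb' := (PySem.List.mem_dedup p b).mp hb
      rwa [List.idxOf_append_of_mem ha', List.idxOf_append_of_mem hb']
    · rw [if_neg h]
      rw [List.pairwise_append]
      refine ⟨ih.imp_of_mem ?_, List.pairwise_singleton _ _, ?_⟩
      · intro a b ha hb hab
        have ha' := (PySem.List.mem_dedup p a).mp ha
        have hb' := (PySem.List.mem_dedup p b).mp hb
        rwa [List.idxOf_append_of_mem ha', List.idxOf_append_of_mem hb']
      · intro a ha b hb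
        have ha' := (PySem.List.mem_dedup p a).mp ha
        rw [List.mem_singleton] at hb
        subst hb
        rw [List.idxOf_append_of_mem ha', List.idxOf_append]
        simp only [h, if_false]
        have := List.idxOf_lt_length_of_mem ha'
        simp
        omega

lemma pv_filter_split {α : Type} (l : List α) (R : α → α → Prop) (A q : α → Bool)
    (hp : l.Pairwise R) (mono : ∀ a b, R a b → q b = true → q a = true) :
    l.filter (fun u => A u && q u) ++ l.filter (fun u => A u && !q u) = l.filter A := by
  induction l with
  | nil => rfl
  | cons h t ih =>
    have hp' := (List.pairwise_cons.mp hp)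
    by_cases hq : q h = true
    · by_cases hA : A h = true
      · simp [List.filter_cons, hq, hA, ih hp'.2]
      · simp only [Bool.not_eq_true] at hA
        simp [List.filter_cons, hq, hA, ih hp'.2]
    · simp only [Bool.not_eq_true] at hq
      have ht : ∀ b ∈ t, q b = false := by
        intro b hb
        by_contra hc
        simp only [Bool.not_eq_false] at hc
        have := mono h b (hp'.1 b hb) hc
        simp [this] at hq
      have h1 : t.filter (fun u => A u && q u) = [] := by
        rw [List.filter_eq_nil_iff]; intro b hb; simp [ht b hb]
      have h2 : t.filter (fun u => A u && !q u) = t.filter A := by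
        apply List.filter_congr; intro b hb; simp [ht b hb]
      by_cases hA : A h = true <;>
        simp [List.filter_cons, hq, hA, h1, h2]

lemma pv_drop_cond (p : List String) (x w u : String) (hu : u ∈ p) (hw : w ≠ x) :
    (w ∈ (p ++ [x]).drop ((p ++ [x]).idxOf u + 1)) ↔ (w ∈ p.drop (p.idxOf u + 1)) := by
  rw [List.idxOf_append_of_mem hu,
    List.drop_append_of_le_length (by have := List.idxOf_lt_length_of_mem hu; omega)]
  simp [hw]

lemma pv_val_append_ne (p : List String) (x w : String) (hw : w ≠ x) :
    pvVal (p ++ [x]) w = pvVal p w := by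
  unfold pvVal
  rw [pv_dedup_append]
  by_cases h : x ∈ p
  · rw [if_pos h]
    congr 1
    apply List.filter_congr
    intro u hu
    have hu' := (PySem.List.mem_dedup p u).mp hu
    congr 1
    rw [Bool.eq_iff_iff]
    simp only [decide_eq_true_eq]
    exact pv_drop_cond p x w u hu' hw
  · rw [if_neg h, List.filter_append]
    have h2 : [x].filter (fun u =>
        (u != w) && pvShares u w && decide (w ∈ (p ++ [x]).drop ((p ++ [x]).idxOf u + 1))) = [] := by
      simp only [List.filter_cons, List.filter_nil]
      rw [if_neg]
      intro hc
      have h3 : x ∈ p ++ [x] := by simp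
      rw [List.idxOf_append, if_neg h] at hc
      rw [List.drop_eq_nil_of_le (by simp)] at hc
      simp at hc
    rw [h2, List.append_nil]
    congr 1
    apply List.filter_congr
    intro u hu
    have hu' := (PySem.List.mem_dedup p u).mp hu
    congr 1
    rw [Bool.eq_iff_iff]
    simp only [decide_eq_true_eq]
    exact pv_drop_cond p x w u hu' hw

lemma pv_val_append_self (p : List String) (x : String) :
    pvVal (p ++ [x]) x =
      x :: (PySem.List.dedup p).filter (fun u => (u != x) && pvShares u x) := by
  unfold pvVal
  congr 1
  have key : ∀ u ∈ PySem.List.dedup p,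
      ((u != x) && pvShares u x && decide (x ∈ (p ++ [x]).drop ((p ++ [x]).idxOf u + 1)))
        = ((u != x) && pvShares u x) := by
    intro u hu
    have hu' := (PySem.List.mem_dedup p u).mp hu
    have hlt := List.idxOf_lt_length_of_mem hu'
    have hcond : x ∈ (p ++ [x]).drop ((p ++ [x]).idxOf u + 1) := by
      rw [List.idxOf_append_of_mem hu', List.drop_append_of_le_length (by omega)]
      simp
    simp [hcond]
  rw [pv_dedup_append]
  by_cases h : x ∈ p
  · rw [if_pos h]
    exact List.filter_congr key
  · rw [if_neg h, List.filter_append]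
    have h2 : [x].filter (fun u =>
        (u != x) && pvShares u x && decide (x ∈ (p ++ [x]).drop ((p ++ [x]).idxOf u + 1))) = [] := by
      simp
    rw [h2, List.append_nil]
    exact List.filter_congr key

lemma pv_charloop_stay (cs : List Char) (d : PySem.Dict String (List String))
    (words word : String) (h : (d.getD words []).contains word = true) :
    cs.foldl (pvCharStep words word) d = d := by
  induction cs with
  | nil => rfl
  | cons c cs ih =>
    simp only [List.foldl_cons, pvCharStep, h, Bool.not_true, Bool.and_false, if_false]
    exact ih

lemma pv_charloop (cs : List Char) (d : PySem.Dict String (List String)) (words word : String) :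
    cs.foldl (pvCharStep words word) d =
      if cs.any (fun c => words.toList.contains c) && !((d.getD words []).contains word) then
        d.insert words ((d.getD words []) ++ [word])
      else d := by
  induction cs generalizing d with
  | nil => simp
  | cons c cs ih =>
    simp only [List.foldl_cons, List.any_cons]
    by_cases hcont : (d.getD words []).contains word = true
    · rw [show pvCharStep words word d c = d by
          simp only [pvCharStep, hcont, Bool.not_true, Bool.and_false, Bool.false_eq_true, if_false],
        pv_charloop_stay cs d words word hcont, if_neg (by rw [hcont]; simp)]
    · simp only [Bool.not_eq_true] at hcont
      by_cases hc : words.toList.contains c = true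
      · have hcond : ((words.toList.contains c || cs.any fun c => words.toList.contains c)
            && !(d.getD words []).contains word) = true := by
          rw [hc, hcont]; rfl
        have hstep : pvCharStep words word d c = d.insert words ((d.getD words []) ++ [word]) := by
          simp only [pvCharStep, hc, hcont]; rfl
        rw [hstep, pv_charloop_stay _ _ _ _ (by rw [PySem.Dict.getD_insert]; simp), if_pos hcond]
      · simp only [Bool.not_eq_true] at hc
        rw [show pvCharStep words word d c = d by
          simp only [pvCharStep, hc, Bool.false_and, Bool.false_eq_true, if_false], ih d]
        simp only [List.any_cons, hc, Bool.false_or]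

lemma pv_keystep (words : String) (d : PySem.Dict String (List String)) (word : String) :
    pvKeyStep words d word =
      if (word != words) && pvShares word words && !((d.getD words []).contains word) then
        d.insert words ((d.getD words []) ++ [word])
      else d := by
  unfold pvKeyStep
  by_cases hne : (word != words) = true
  · rw [if_pos hne, pv_charloop]
    simp only [hne, Bool.true_and]
    rfl
  · simp only [Bool.not_eq_true] at hne
    simp [hne]

lemma pv_keysloop (ks : List String) (d : PySem.Dict String (List String)) (words : String)
    (hnd : ks.Nodup) :
    (∀ k, k ≠ words → (ks.foldl (pvKeyStep words) d).get? k = d.get? k) ∧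
    (ks.foldl (pvKeyStep words) d).getD words [] =
      d.getD words [] ++ ks.filter (fun u =>
        (u != words) && pvShares u words && !((d.getD words []).contains u)) ∧
    (d.contains words = true → (ks.foldl (pvKeyStep words) d).keys = d.keys) := by
  induction ks generalizing d with
  | nil => simp
  | cons u ks ih =>
    have hnd' := List.nodup_cons.mp hnd
    simp only [List.foldl_cons]
    by_cases hcond : ((u != words) && pvShares u words && !((d.getD words []).contains u)) = true
    · -- u gets appended
      set v := d.getD words [] with hv
      have hstep : pvKeyStep words d u = d.insert words (v ++ [u]) := by
        rw [pv_keystep, if_pos hcond]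
      rw [hstep]
      obtain ⟨ih1, ih2, ih3⟩ := ih (d.insert words (v ++ [u])) hnd'.2
      have hne : u ≠ words := by
        intro he; rw [he] at hcond; simp at hcond
      refine ⟨?_, ?_, ?_⟩
      · intro k hk
        rw [ih1 k hk, PySem.Dict.get?_insert_of_ne _ _ hk]
      · rw [ih2]
        have hgd : (d.insert words (v ++ [u])).getD words [] = v ++ [u] := by
          rw [PySem.Dict.getD_insert]; simp
        rw [hgd]
        have hfeq : ks.filter (fun x =>
              (x != words) && pvShares x words && !((v ++ [u]).contains x))
            = ks.filter (fun x =>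
              (x != words) && pvShares x words && !(v.contains x)) := by
          apply List.filter_congr
          intro x hx
          have hxu : x ≠ u := fun he => hnd'.1 (he ▸ hx)
          have : (v ++ [u]).contains x = v.contains x := by
            simp [List.contains_eq_mem, hxu]
          rw [this]
        rw [hfeq, List.filter_cons, if_pos hcond]
        simp
      · intro hc
        have := ih3 (by simp [PySem.Dict.contains_insert])
        rw [this, PySem.Dict.keys_insert_of_contains _ _ hc]
    · -- u not appended
      have hstep : pvKeyStep words d u = d := by rw [pv_keystep, if_neg hcond]
      rw [hstep, List.filter_cons, if_neg hcond]
      exact ih d hnd'.2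

lemma pv_stepA (p : List String) (x : String) (d : PySem.Dict String (List String))
    (h : pvInvA p d) : pvInvA (p ++ [x]) (pvWordStep d x) := by
  obtain ⟨hkeys, hval⟩ := h
  have hnodup : d.keys.Nodup := hkeys ▸ PySem.List.nodup_dedup p
  have hcontains : d.contains x = decide (x ∈ p) := by
    rw [PySem.Dict.contains_eq_decide_mem_keys, hkeys]
    simp [PySem.List.mem_dedup]
  have hmono : ∀ a b : String, p.idxOf a < p.idxOf b →
      decide (x ∈ p.drop (p.idxOf b + 1)) = true →
      decide (x ∈ p.drop (p.idxOf a + 1)) = true := by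
    intro a b hab hq
    simp only [decide_eq_true_eq] at hq ⊢
    exact List.drop_subset_drop_left p (by omega) hq
  unfold pvWordStep
  by_cases hx : x ∈ p
  · -- x already a key: the initial insert is skipped
    rw [show (if !(d.contains x) then d.insert x [x] else d) = d by
      rw [hcontains]; simp [hx]]
    have hcx : d.contains x = true := by rw [hcontains]; simp [hx]
    obtain ⟨l1, l2, l3⟩ := pv_keysloop d.keys d x hnodup
    have hdx : d.getD x [] = pvVal p x := by rw [hval x, pvValIf, if_pos hx]
    constructor
    · rw [l3 hcx, hkeys, pv_dedup_append, if_pos hx]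
    · intro w
      by_cases hw : w = x
      · rw [hw, l2, hkeys, hdx]
        have hcongr : (PySem.List.dedup p).filter (fun u =>
              (u != x) && pvShares u x && !((pvVal p x).contains u))
            = (PySem.List.dedup p).filter (fun u =>
              ((u != x) && pvShares u x) && !(decide (x ∈ p.drop (p.idxOf u + 1)))) := by
          apply List.filter_congr
          intro u hu
          cases h1 : (u != x) with
          | false => simp [h1]
          | true =>
            cases h2 : pvShares u x with
            | false => simp [h1, h2]
            | true =>
              have hne : u ≠ x := by simpa using h1
              have hu2 : ((pvVal p x).contains u) = decide (x ∈ p.drop (p.idxOf u + 1)) := by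
                rw [List.contains_eq_mem]
                simp [pvVal, hne, hu, (PySem.List.mem_dedup p u).mp hu, h1, h2]
              simp only [h1, h2, hu2, Bool.true_and]
        rw [hcongr]
        have hsplit := pv_filter_split (PySem.List.dedup p) _
          (fun u => (u != x) && pvShares u x)
          (fun u => decide (x ∈ p.drop (p.idxOf u + 1)))
          (pv_dedup_pairwise_idxOf p) hmono
        have hv1 : pvVal p x = x :: (PySem.List.dedup p).filter (fun u =>
            ((u != x) && pvShares u x) && decide (x ∈ p.drop (p.idxOf u + 1))) := by
          simp only [pvVal, Bool.and_assoc]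
        rw [hv1, List.cons_append, hsplit, pvValIf, if_pos (by simp [hx]), pv_val_append_self]
      · rw [PySem.Dict.getD, l1 w hw, ← PySem.Dict.getD, hval w]
        rw [pvValIf, pvValIf]
        by_cases hwp : w ∈ p
        · rw [if_pos hwp, if_pos (by simp [hwp]), pv_val_append_ne p x w hw]
        · rw [if_neg hwp, if_neg (by simp [hwp, hw])]
  · -- x is new
    have hcx : d.contains x = false := by rw [hcontains]; simp [hx]
    rw [show (if !(d.contains x) then d.insert x [x] else d) = d.insert x [x] by
      rw [hcx]; simp]
    set d1 := d.insert x [x] with hd1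
    have hk1 : d1.keys = PySem.List.dedup p ++ [x] :=
      hkeys ▸ PySem.Dict.keys_insert_of_not_contains d [x] hcx
    have hxd : x ∉ PySem.List.dedup p := by
      rw [PySem.List.mem_dedup]; exact hx
    have hnd1 : d1.keys.Nodup := by
      rw [hk1]
      exact List.Nodup.append (PySem.List.nodup_dedup p) (List.nodup_singleton x)
        (by simp [PySem.List.mem_dedup, hx])
    have hd1x : d1.getD x [] = [x] := by rw [hd1, PySem.Dict.getD_insert]; simp
    obtain ⟨l1, l2, l3⟩ := pv_keysloop d1.keys d1 x hnd1
    constructor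
    · rw [l3 (by rw [hd1]; simp [PySem.Dict.contains_insert]), hk1, pv_dedup_append, if_neg hx]
    · intro w
      by_cases hw : w = x
      · subst hw
        rw [l2, hd1x, hk1, List.filter_append]
        have hxf : [w].filter (fun u =>
            (u != w) && pvShares u w && !(([w] : List String).contains u)) = [] := by simp
        rw [hxf, List.append_nil]
        have hfc : (PySem.List.dedup p).filter (fun u =>
              (u != w) && pvShares u w && !(([w] : List String).contains u))
            = (PySem.List.dedup p).filter (fun u => (u != w) && pvShares u w) := by
          apply List.filter_congr
          intro u hu
          cases h1 : (u != w) with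
          | false => simp [h1]
          | true =>
            have hne : u ≠ w := by simpa using h1
            simp [h1, List.contains_eq_mem, hne]
        rw [hfc, pvValIf, if_pos (by simp), pv_val_append_self]
        rfl
      · rw [PySem.Dict.getD, l1 w hw, hd1, PySem.Dict.get?_insert_of_ne _ _ hw, ← PySem.Dict.getD,
          hval w, pvValIf, pvValIf]
        by_cases hwp : w ∈ p
        · rw [if_pos hwp, if_pos (by simp [hwp]), pv_val_append_ne p x w hw]
        · rw [if_neg hwp, if_neg (by simp [hwp, hw])]

lemma pv_A_items (wordList : List String) :
    shareALetter wordList =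
      (PySem.List.dedup wordList).map (fun w => (w, pvVal wordList w)) := by
  have hinv : pvInvA wordList (wordList.foldl pvWordStep PySem.Dict.empty) := by
    induction wordList using List.reverseRecOn with
    | nil =>
      constructor
      · simp [PySem.Dict.keys_empty, PySem.List.dedup, PySem.Set.ofList]
      · intro w
        simp [PySem.Dict.getD_empty, pvValIf]
    | append_singleton p x ih =>
      rw [List.foldl_append, List.foldl_cons, List.foldl_nil]
      exact pv_stepA p x _ ih
  obtain ⟨hkeys, hval⟩ := hinv
  unfold shareALetter
  rw [PySem.Dict.items_eq_map_keys _ (hkeys ▸ PySem.List.nodup_dedup wordList) [], hkeys]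
  apply List.map_congr_left
  intro w hw
  rw [hval w, pvValIf, if_pos ((PySem.List.mem_dedup wordList w).mp hw)]

lemma pv_idxOf_le (l : List String) (a : String) (i : Nat) (h1 : i < l.length) (he : l[i] = a) :
    l.idxOf a ≤ i := by
  by_contra hlt
  push Not at hlt
  have ha : a ∈ l := he ▸ List.getElem_mem h1
  have hmem : a ∈ l.take (l.idxOf a) := by
    rw [List.mem_take_iff_getElem]
    exact ⟨i, by simp [h1, hlt], he⟩
  rw [List.mem_take_iff_idxOf_lt ha] at hmem
  omega

lemma pv_lastIdx_append_self (p : List String) (x : String) :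
    pvLastIdx (p ++ [x]) x = p.length := by
  unfold pvLastIdx
  rw [List.reverse_append]
  simp

lemma pv_lastIdx_append_ne (p : List String) (x w : String) (hw : w ≠ x) :
    pvLastIdx (p ++ [x]) w = pvLastIdx p w := by
  unfold pvLastIdx
  rw [List.reverse_append]
  simp only [List.reverse_singleton, List.singleton_append, List.length_append,
    List.length_singleton]
  rw [List.idxOf_cons_ne _ (by exact fun h => hw h.symm)]
  omega

-- p[pvLastIdx p w] = w and nothing later equals w

lemma pv_lastIdx_getElem (p : List String) (w : String) (hw : w ∈ p) :
    ∃ h : pvLastIdx p w < p.length, p[pvLastIdx p w]'h = w := by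
  have hwr : w ∈ p.reverse := by simpa using hw
  have hr := List.idxOf_lt_length_of_mem hwr
  rw [List.length_reverse] at hr
  have hlt : pvLastIdx p w < p.length := by unfold pvLastIdx; omega
  refine ⟨hlt, ?_⟩
  have := List.getElem_idxOf (xs := p.reverse) (x := w) (by simpa using hr)
  rw [List.getElem_reverse] at this
  calc p[pvLastIdx p w]'hlt
      = p[p.length - 1 - List.idxOf w p.reverse]'(by unfold pvLastIdx at hlt; omega) :=
        getElem_congr rfl (by unfold pvLastIdx; rfl) _
    _ = w := this

lemma pv_lastIdx_max (p : List String) (w : String) (i : Nat) (hi : i < p.length)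
    (he : p[i] = w) : i ≤ pvLastIdx p w := by
  have h2 : p.length - 1 - i < p.reverse.length := by rw [List.length_reverse]; omega
  have he' : p.reverse[p.length - 1 - i]'h2 = w := by
    rw [List.getElem_reverse]
    calc p[p.length - 1 - (p.length - 1 - i)]'(by omega)
        = p[i]'hi := getElem_congr rfl (by omega) _
      _ = w := he
  have := pv_idxOf_le p.reverse w (p.length - 1 - i) h2 he'
  unfold pvLastIdx
  omega

lemma pv_mem_drop_iff_lastIdx (p : List String) (w : String) (hw : w ∈ p) (n : Nat) :
    w ∈ p.drop n ↔ n ≤ pvLastIdx p w := by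
  constructor
  · intro h
    rw [List.mem_drop_iff_getElem] at h
    obtain ⟨j, hj, he⟩ := h
    have := pv_lastIdx_max p w (n + j) (by omega) he
    omega
  · intro h
    obtain ⟨hlt, he⟩ := pv_lastIdx_getElem p w hw
    rw [List.mem_drop_iff_getElem]
    refine ⟨pvLastIdx p w - n, by omega, ?_⟩
    calc p[n + (pvLastIdx p w - n)]'(by omega)
        = p[pvLastIdx p w]'hlt := getElem_congr rfl (by omega) _
      _ = w := he

lemma pv_stepB (p : List String) (x : String)
    (st : PySem.Dict String Int × PySem.Dict String Int × List String)
    (h : pvInvB p st) : pvInvB (p ++ [x]) (pvAltIndexStep st ((p.length : Int), x)) := by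
  obtain ⟨ho, hf, hl⟩ := h
  have hcont : st.1.contains x = decide (x ∈ p) := by
    rw [PySem.Dict.contains_eq_isSome_get?, hf x]
    by_cases hx : x ∈ p <;> simp [hx]
  unfold pvAltIndexStep
  dsimp only
  by_cases hx : x ∈ p
  · rw [hcont]
    simp only [hx, decide_true, Bool.not_true, Bool.false_eq_true, if_false]
    refine ⟨by rw [ho, pv_dedup_append, if_pos hx], ?_, ?_⟩
    · intro u
      rw [hf u]
      by_cases hu : u ∈ p
      · rw [if_pos hu, if_pos (by simp [hu]), List.idxOf_append_of_mem hu]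
      · by_cases hux : u = x
        · exact absurd (hux ▸ hx) hu
        · rw [if_neg hu, if_neg (by simp [hu, hux])]
    · intro w
      by_cases hwx : w = x
      · subst hwx
        rw [PySem.Dict.get?_insert_self, if_pos (by simp), pv_lastIdx_append_self]
      · rw [PySem.Dict.get?_insert_of_ne _ _ hwx, hl w]
        by_cases hw : w ∈ p
        · rw [if_pos hw, if_pos (by simp [hw]), pv_lastIdx_append_ne p x w hwx]
        · rw [if_neg hw, if_neg (by simp [hw, hwx])]
  · rw [hcont]
    simp only [hx, decide_false, Bool.not_false, if_true]
    refine ⟨by rw [ho, pv_dedup_append, if_neg hx], ?_, ?_⟩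
    · intro u
      by_cases hux : u = x
      · subst hux
        rw [PySem.Dict.get?_insert_self, if_pos (by simp)]
        rw [List.idxOf_append, if_neg hx]
        simp
      · rw [PySem.Dict.get?_insert_of_ne _ _ hux, hf u]
        by_cases hu : u ∈ p
        · rw [if_pos hu, if_pos (by simp [hu]), List.idxOf_append_of_mem hu]
        · rw [if_neg hu, if_neg (by simp [hu, hux])]
    · intro w
      by_cases hwx : w = x
      · subst hwx
        rw [PySem.Dict.get?_insert_self, if_pos (by simp), pv_lastIdx_append_self]
      · rw [PySem.Dict.get?_insert_of_ne _ _ hwx, hl w]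
        by_cases hw : w ∈ p
        · rw [if_pos hw, if_pos (by simp [hw]), pv_lastIdx_append_ne p x w hwx]
        · rw [if_neg hw, if_neg (by simp [hw, hwx])]

lemma pv_scanB (wordList : List String) :
    pvInvB wordList ((PySem.List.enumerate wordList).foldl pvAltIndexStep
      (PySem.Dict.empty, PySem.Dict.empty, [])) := by
  induction wordList using List.reverseRecOn with
  | nil =>
    refine ⟨by simp [PySem.List.dedup, PySem.Set.ofList, PySem.List.enumerate], ?_, ?_⟩ <;>
      intro u <;> simp [PySem.List.enumerate, PySem.Dict.get?_empty]
  | append_singleton p x ih =>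
    rw [PySem.List.enumerate_append, List.foldl_append]
    have : PySem.List.enumerate [x] (0 + p.length) = [((p.length : Int), x)] := by
      simp [PySem.List.enumerate_cons, PySem.List.enumerate_nil]
    rw [this, List.foldl_cons, List.foldl_nil]
    exact pv_stepB p x _ ih

lemma pv_mask_testBit (cs : List Char) (m : Nat) (k : Nat) :
    (cs.foldl (fun m c => m ||| (1 <<< c.toNat)) m).testBit k =
      (m.testBit k || cs.any (fun c => c.toNat == k)) := by
  induction cs generalizing m with
  | nil => simp
  | cons c cs ih =>
    simp only [List.foldl_cons, List.any_cons]
    rw [ih]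
    rw [Nat.testBit_or, Nat.one_shiftLeft, Nat.testBit_two_pow]
    cases h : (c.toNat == k) <;> simp_all

lemma pv_char_toNat_inj (a b : Char) (h : a.toNat = b.toNat) : a = b := by
  have : a.val.toNat = b.val.toNat := h
  exact Char.ext (UInt32.toNat_inj.mp this)

lemma pv_mask_shares (u w : String) :
    ((pvAltMask u &&& pvAltMask w) != 0) = pvShares u w := by
  have htb : ∀ (s : String) (k : Nat), (pvAltMask s).testBit k
      = s.toList.any (fun c => c.toNat == k) := by
    intro s k
    rw [pvAltMask, pv_mask_testBit]
    simp
  rw [Bool.eq_iff_iff, bne_iff_ne, ne_eq]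
  constructor
  · intro hne
    obtain ⟨k, hk⟩ := Nat.exists_testBit_of_ne_zero hne
    rw [Nat.testBit_and, htb, htb, Bool.and_eq_true] at hk
    obtain ⟨h1, h2⟩ := hk
    simp only [List.any_eq_true, beq_iff_eq] at h1 h2
    obtain ⟨c, hc, hck⟩ := h1
    obtain ⟨c', hc', hck'⟩ := h2
    have : c = c' := pv_char_toNat_inj c c' (by omega)
    rw [pvShares, List.any_eq_true]
    exact ⟨c, hc, by rw [List.contains_eq_mem]; simp [this ▸ hc']⟩
  · intro hs hz
    rw [pvShares, List.any_eq_true] at hs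
    obtain ⟨c, hc, hcw⟩ := hs
    rw [List.contains_eq_mem, decide_eq_true_eq] at hcw
    have h1 : (pvAltMask u).testBit c.toNat = true := by
      rw [htb]; simp only [List.any_eq_true, beq_iff_eq]; exact ⟨c, hc, rfl⟩
    have h2 : (pvAltMask w).testBit c.toNat = true := by
      rw [htb]; simp only [List.any_eq_true, beq_iff_eq]; exact ⟨c, hcw, rfl⟩
    have : (pvAltMask u &&& pvAltMask w).testBit c.toNat = true := by
      rw [Nat.testBit_and, h1, h2]; rfl
    rw [hz] at this
    simp at this

lemma pv_getD_foldl_insert {ν : Type} (l : List String) (f : String → ν)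
    (d : PySem.Dict String ν) (u : String) (d0 : ν) :
    (l.foldl (fun m w => m.insert w (f w)) d).getD u d0 =
      if u ∈ l then f u else d.getD u d0 := by
  induction l generalizing d with
  | nil => simp
  | cons w l ih =>
    simp only [List.foldl_cons]
    rw [ih]
    by_cases hu : u ∈ l
    · rw [if_pos hu, if_pos (by simp [hu])]
    · rw [if_neg hu, PySem.Dict.getD_insert]
      by_cases huw : u = w
      · rw [if_pos huw, if_pos (by simp [huw]), huw]
      · rw [if_neg huw, if_neg (by simp [hu, huw])]

lemma pv_B_items (wordList : List String) :
    shareALetter_alt wordList =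
      (PySem.List.dedup wordList).map (fun w => (w, pvVal wordList w)) := by
  unfold shareALetter_alt
  obtain ⟨ho, hf, hl⟩ := pv_scanB wordList
  set st := (PySem.List.enumerate wordList).foldl pvAltIndexStep
    (PySem.Dict.empty, PySem.Dict.empty, []) with hst
  dsimp only
  rw [ho]
  have hnd : (PySem.List.dedup wordList).Nodup := PySem.List.nodup_dedup wordList
  have hmask : ∀ u ∈ PySem.List.dedup wordList,
      ((PySem.List.dedup wordList).foldl (fun m w => m.insert w (pvAltMask w))
      (PySem.Dict.empty : PySem.Dict String Nat)).getD u 0 = pvAltMask u := by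
    intro u hu
    rw [pv_getD_foldl_insert, if_pos hu]
  have hitems := PySem.Dict.items_foldl_insert_fresh (PySem.List.dedup wordList) (fun w => w)
    (fun w => w :: (PySem.List.dedup wordList).filter (fun u =>
        (u != w) && decide (st.1.getD u 0 < st.2.1.getD w 0)
          && ((((PySem.List.dedup wordList).foldl (fun m w => m.insert w (pvAltMask w))
              (PySem.Dict.empty : PySem.Dict String Nat)).getD u 0 &&&
              ((PySem.List.dedup wordList).foldl (fun m w => m.insert w (pvAltMask w))
              (PySem.Dict.empty : PySem.Dict String Nat)).getD w 0) != 0)))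
    PySem.Dict.empty
    (fun a _ => PySem.Dict.contains_empty a)
    (by simpa using hnd)
  have hemp : (PySem.Dict.empty : PySem.Dict String (List String)).items = [] := rfl
  rw [hemp, List.nil_append] at hitems
  rw [hitems]
  apply List.map_congr_left
  intro w hw
  have hwp : w ∈ wordList := (PySem.List.mem_dedup wordList w).mp hw
  rw [Prod.mk.injEq]
  refine ⟨rfl, ?_⟩
  dsimp only
  rw [pvVal]
  congr 1
  apply List.filter_congr
  intro u hu
  have hup : u ∈ wordList := (PySem.List.mem_dedup wordList u).mp hu
  have h1 : st.1.getD u 0 = (wordList.idxOf u : Int) := by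
    rw [PySem.Dict.getD, hf u, if_pos hup]; rfl
  have h2 : st.2.1.getD w 0 = (pvLastIdx wordList w : Int) := by
    rw [PySem.Dict.getD, hl w, if_pos hwp]; rfl
  have h3 : decide (st.1.getD u 0 < st.2.1.getD w 0)
      = decide (w ∈ wordList.drop (wordList.idxOf u + 1)) := by
    rw [h1, h2]
    rw [Bool.eq_iff_iff, decide_eq_true_eq, decide_eq_true_eq,
      pv_mem_drop_iff_lastIdx wordList w hwp]
    omega
  rw [h3, hmask u hu, hmask w hw, pv_mask_shares]
  cases (u != w) <;> cases pvShares u w <;>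
    cases decide (w ∈ wordList.drop (wordList.idxOf u + 1)) <;> rfl

-- ===== VERDICT (by name: the statement is the Claim_ definition above) =====
theorem shareALetter_spec : Claim_equal_shareALetter := by
  intro wordList _
  unfold Spec_shareALetter
  rw [pv_A_items, pv_B_items]
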